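-- pv_equiv track=rewrite | github.com/foued2/doctor-workspace | doctor/doctor_grader.py | classify_partial_vs_incorrect
-- ===== SOURCE A (Python) =====
-- STANDARD_CASE_LABELS = frozenset({
--     "basic", "normal", "standard", "general", "typical", "common",
--     # Core algorithm correctness — not edge conditions
--     "wrong_type", "wrong_order", "wrong_type_check", "wrong_char",
--     "subtractive_iv", "subtractive_ix", "subtractive",
--     "complex", "complex_case",
-- })
--
-- def classify_partial_vs_incorrect(failure_reasons: list[str]) -> str:
--     """Decide whether a failing solution is partial or incorrect.
--
--     Input: list of failed test labels from Layer 2 execution.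
--
--     **partial** = passes all standard cases, fails only edge/constraint labels.
--     **incorrect** = fails at least one standard (non-edge) case.
--     """
--     if not failure_reasons:
--         return "correct"
--
--     failures_lower = [f.lower() for f in failure_reasons]
--
--     # Check if any standard case failed → incorrect
--     for label in failures_lower:
--         for std in STANDARD_CASE_LABELS:
--             if std in label:
--                 return "incorrect"
--
--     # All failures are edge-case or constraint violation → partial
--     return "partial"
-- ===== SOURCE B (Python) =====
-- # B: length-grouped sliding-window classifier. Labels are bucketed by length once;
-- # a string is a hit iff some exact-length window of it is a member of that length's
-- # label set (set membership, no substring search). This matches A's "std in label"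
-- # semantics because a substring occurrence of a label of length L is exactly a
-- # length-L window equal to that label.
-- _LABELS = (
--     "basic", "normal", "standard", "general", "typical", "common",
--     "wrong_type", "wrong_order", "wrong_type_check", "wrong_char",
--     "subtractive_iv", "subtractive_ix", "subtractive",
--     "complex", "complex_case",
-- )
-- _BY_LENGTH = {}
-- for _p in _LABELS:
--     _BY_LENGTH.setdefault(len(_p), set()).add(_p)
-- _BY_LENGTH = tuple((l, frozenset(ps)) for l, ps in _BY_LENGTH.items())
--
--
-- def classify_partial_vs_incorrect(failure_reasons: list[str]) -> str:
--     if not failure_reasons: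
--         return "correct"
--     for f in failure_reasons:
--         fl = f.lower()
--         n = len(fl)
--         for L, labels in _BY_LENGTH:
--             if L <= n and any(fl[i:i + L] in labels for i in range(n - L + 1)):
--                 return "incorrect"
--     return "partial"
-- ===== Notes on version B (the rewrite author's own statement) =====
-- stated objective: alternative
-- what changed: Replaces A's per-pattern substring scan ('std in label' for each of 15 labels) by a multi-pattern sliding-window matcher: labels are bucketed by length once, and each exact-length window of the string is tested for hash-set membership in that length's bucket.
import Mathlib
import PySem

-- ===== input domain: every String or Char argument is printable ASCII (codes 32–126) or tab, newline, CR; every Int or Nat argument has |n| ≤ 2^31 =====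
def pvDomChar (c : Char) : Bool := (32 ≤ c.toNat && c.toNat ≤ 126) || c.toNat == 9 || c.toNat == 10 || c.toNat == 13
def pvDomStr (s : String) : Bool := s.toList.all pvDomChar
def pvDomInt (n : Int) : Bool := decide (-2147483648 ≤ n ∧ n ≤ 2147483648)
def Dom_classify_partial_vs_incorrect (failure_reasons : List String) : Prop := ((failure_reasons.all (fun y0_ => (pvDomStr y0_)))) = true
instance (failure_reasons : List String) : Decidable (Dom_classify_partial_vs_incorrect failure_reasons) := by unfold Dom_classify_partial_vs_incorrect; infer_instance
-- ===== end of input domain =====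

-- B replaces A's per-pattern substring scan by a length-grouped sliding-window
-- set-membership matcher (objective: alternative).

-- ===== PORT A =====
-- frozenset of labels; the loop over it only produces a boolean existence, which is
-- independent of the set's iteration order, so 'any' over the Set is exact.
def standardCaseLabels : PySem.Set String := PySem.Set.ofList
  ["basic", "normal", "standard", "general", "typical", "common",
   "wrong_type", "wrong_order", "wrong_type_check", "wrong_char",
   "subtractive_iv", "subtractive_ix", "subtractive",
   "complex", "complex_case"]

def classify_partial_vs_incorrect (failure_reasons : List String) : String :=
  if failure_reasons = [] then "correct"
  else
    let failures_lower := failure_reasons.map PySem.Str.lower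
    -- nested 'for … for … if …: return "incorrect"' = existence over labels × set
    if failures_lower.any (fun label =>
        standardCaseLabels.any (fun std => PySem.Str.isIn std label)) then "incorrect"
    else "partial"

-- ===== PORT B =====
-- the module-level _BY_LENGTH: labels bucketed by length, dict insertion order
def byLength : List (Nat × PySem.Set String) :=
  [(5,  PySem.Set.ofList ["basic"]),
   (6,  PySem.Set.ofList ["normal", "common"]),
   (8,  PySem.Set.ofList ["standard"]),
   (7,  PySem.Set.ofList ["general", "typical", "complex"]),
   (10, PySem.Set.ofList ["wrong_type", "wrong_char"]),
   (11, PySem.Set.ofList ["wrong_order", "subtractive"]),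
   (16, PySem.Set.ofList ["wrong_type_check"]),
   (14, PySem.Set.ofList ["subtractive_iv", "subtractive_ix"]),
   (12, PySem.Set.ofList ["complex_case"])]

def classify_partial_vs_incorrect_alt (failure_reasons : List String) : String :=
  if failure_reasons = [] then "correct"
  else if failure_reasons.any (fun f =>
      let fl := PySem.Str.lower f
      let n := fl.toList.length
      byLength.any (fun e =>
        -- fl[i:i+L] with 0 ≤ i, i+L within range = (drop i).take L: exact
        decide (e.1 ≤ n) && (List.range (n - e.1 + 1)).any (fun i =>
          e.2.any (fun p => p.toList == (fl.toList.drop i).take e.1))))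
    then "incorrect"
  else "partial"

-- ===== PRECONDITION & SPEC =====
def Spec_classify_partial_vs_incorrect (failure_reasons : List String) (out : String) : Prop := out = classify_partial_vs_incorrect_alt failure_reasons
instance (failure_reasons : List String) (out : String) : Decidable (Spec_classify_partial_vs_incorrect failure_reasons out) := by unfold Spec_classify_partial_vs_incorrect; infer_instance

-- ===== CLAIM (what is proved, stated in full; the proofs are below) =====
def Claim_equal_classify_partial_vs_incorrect : Prop := ∀ (failure_reasons : List String), Dom_classify_partial_vs_incorrect failure_reasons → Spec_classify_partial_vs_incorrect failure_reasons (classify_partial_vs_incorrect failure_reasons)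

-- ===== LEMMAS AND PROOFS =====

-- the buckets partition the label set: every bucket member is a standard label of
-- the bucket's (positive) length, and every standard label sits in some bucket
theorem bucket_sound : ∀ e ∈ byLength, ∀ p ∈ e.2, p ∈ standardCaseLabels ∧ p.toList.length = e.1 ∧ 1 ≤ e.1 := by decide

theorem bucket_complete : ∀ std ∈ standardCaseLabels, ∃ e ∈ byLength, std ∈ e.2 := by decide

-- A's hit test on one (already lowered) string equals B's windowed hit test
theorem hit_eq (s : List Char) :
    standardCaseLabels.any (fun std => PySem.Chars.isIn std.toList s)
      = byLength.any (fun e =>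
          decide (e.1 ≤ s.length) && (List.range (s.length - e.1 + 1)).any (fun i =>
            e.2.any (fun p => p.toList == (s.drop i).take e.1))) := by
  rcases Bool.eq_false_or_eq_true (standardCaseLabels.any (fun std => PySem.Chars.isIn std.toList s)) with h | h <;>
    rw [h] <;> symm
  · -- A hits ⇒ B hits
    rw [List.any_eq_true] at h
    obtain ⟨std, hstd, hIn⟩ := h
    obtain ⟨e, he, hmem⟩ := bucket_complete std hstd
    obtain ⟨-, hlen, hpos⟩ := bucket_sound e he std hmem
    obtain ⟨j, hj⟩ := (PySem.Chars.exists_prefix_drop_iff_isIn _ _).mpr hIn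
    have hle : std.toList.length ≤ (s.drop j).length := hj.length_le
    rw [List.length_drop] at hle
    rw [List.any_eq_true]
    refine ⟨e, he, ?_⟩
    rw [Bool.and_eq_true, List.any_eq_true]
    refine ⟨by simp; omega, j, List.mem_range.mpr (by omega), ?_⟩
    rw [List.any_eq_true]
    refine ⟨std, hmem, ?_⟩
    rw [beq_iff_eq, ← hlen]
    exact List.prefix_iff_eq_take.mp hj
  · -- A misses ⇒ B misses
    rw [List.any_eq_false] at h
    rw [List.any_eq_false]
    rintro e he
    simp only [Bool.and_eq_true, List.any_eq_true, decide_eq_true_eq, not_and, not_exists]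
    rintro - i - p hp hw
    obtain ⟨hstd, -, -⟩ := bucket_sound e he p hp
    rw [beq_iff_eq] at hw
    have hinf : p.toList <:+: s := hw ▸ ((s.drop i).take_prefix e.1).isInfix.trans (s.drop_suffix i).isInfix
    exact h p hstd ((PySem.Chars.isIn_iff_infix _ _).mpr hinf)

-- ===== VERDICT (by name: the statement is the Claim_ definition above) =====
theorem classify_partial_vs_incorrect_spec : Claim_equal_classify_partial_vs_incorrect := by
  intro failure_reasons _
  unfold Spec_classify_partial_vs_incorrect classify_partial_vs_incorrect classify_partial_vs_incorrect_alt
  by_cases hnil : failure_reasons = []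
  · simp [hnil]
  · simp only [if_neg hnil, List.any_map, Function.comp_def]
    have : ∀ f ∈ failure_reasons,
        (standardCaseLabels.any (fun std => PySem.Str.isIn std (PySem.Str.lower f)))
          = (byLength.any (fun e =>
              decide (e.1 ≤ (PySem.Str.lower f).toList.length) &&
              (List.range ((PySem.Str.lower f).toList.length - e.1 + 1)).any (fun i =>
                e.2.any (fun p => p.toList == ((PySem.Str.lower f).toList.drop i).take e.1)))) := by
      intro f _
      simpa [PySem.Str.isIn] using hit_eq (PySem.Str.lower f).toList
    rw [PySem.List.any_congr_mem this]
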